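-- pv_equiv track=rewrite | github.com/IbrahimMI124/DebateJudge | module1_preprocessing/preprocess.py | normalize_speakers
-- ===== SOURCE A (Python) =====
-- def normalize_speakers(turns: list) -> list:
--     """
--     If speakers are named (e.g. "John", "Sarah"), map them to A, B, C...
--     Preserves existing A/B labels if already normalized.
--     """
--     speaker_map = {}
--     labels = iter("ABCDEFGHIJKLMNOPQRSTUVWXYZ")
--
--     normalized = []
--     for turn in turns:
--         speaker = turn["speaker"].strip()
--         if speaker not in speaker_map:
--             speaker_map[speaker] = next(labels)
--         normalized.append({
--             "speaker": speaker_map[speaker],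
--             "text": turn["text"]
--         })
--
--     return normalized
-- ===== SOURCE B (Python) =====
-- def normalize_speakers(turns: list) -> list:
--     """Two passes: first build the speaker->label map from the ordered
--     distinct stripped names, then map every turn through it."""
--     labels = iter("ABCDEFGHIJKLMNOPQRSTUVWXYZ")
--     names = dict.fromkeys(turn["speaker"].strip() for turn in turns)
--     speaker_map = {name: next(labels) for name in names}
--     return [{"speaker": speaker_map[turn["speaker"].strip()],
--              "text": turn["text"]} for turn in turns]
-- ===== Notes on version B (the rewrite author's own statement) =====
-- stated objective: alternative
-- what changed: Single interleaved build-and-emit loop replaced by two passes: first compute the ordered distinct stripped speaker names and zip them with labels drawn from the same 26-letter iterator, then map every turn through the finished dictionary.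
import Mathlib
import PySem

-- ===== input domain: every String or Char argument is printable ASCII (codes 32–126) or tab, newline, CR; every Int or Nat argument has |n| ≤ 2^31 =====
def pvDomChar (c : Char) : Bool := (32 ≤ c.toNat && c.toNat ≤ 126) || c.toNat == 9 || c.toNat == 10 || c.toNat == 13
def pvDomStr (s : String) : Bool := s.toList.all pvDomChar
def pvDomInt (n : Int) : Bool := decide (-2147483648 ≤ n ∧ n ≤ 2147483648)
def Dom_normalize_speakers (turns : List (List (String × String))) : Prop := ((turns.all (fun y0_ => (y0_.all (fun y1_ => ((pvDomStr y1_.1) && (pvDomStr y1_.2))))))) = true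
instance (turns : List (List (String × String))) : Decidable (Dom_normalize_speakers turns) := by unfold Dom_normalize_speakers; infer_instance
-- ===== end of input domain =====

-- B replaces A's single interleaved build-and-emit loop by two passes (build the
-- speaker→label map from the ordered distinct stripped names, then map every turn
-- through it); objective: alternative decomposition, same cost.
-- Python dicts are association lists here; lookup is first match (pvLook).

-- shared dict/string helpers (Python d[k] with a "" default; Pre_ rules the default out)
def pvLook (d : List (String × String)) (k : String) : Option String :=
  match d with
  | [] => none
  | (k', v) :: rest => if k' = k then some v else pvLook rest k

def pvLabels : List String :=
  ["A","B","C","D","E","F","G","H","I","J","K","L","M",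
   "N","O","P","Q","R","S","T","U","V","W","X","Y","Z"]

-- next(labels) after i letters were consumed; "" only past 26 (Pre_ rules it out)
def pvLabelAt (i : Nat) : String := pvLabels.getD i ""

def pvStripName (t : List (String × String)) : String :=
  PySem.Str.strip ((pvLook t "speaker").getD "")

-- ===== PORT A =====
-- A's loop: state = (speaker_map so far, number of labels consumed); a fresh
-- stripped speaker is inserted (dict insert of a NEW key = append) before emitting.
def pvGoA (smap : List (String × String)) (i : Nat) :
    List (List (String × String)) → List (List (String × String))
  | [] => []
  | t :: rest =>
    let speaker := pvStripName t
    match pvLook smap speaker with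
    | some lbl =>
        [("speaker", lbl), ("text", (pvLook t "text").getD "")] :: pvGoA smap i rest
    | none =>
        [("speaker", pvLabelAt i), ("text", (pvLook t "text").getD "")] ::
          pvGoA (smap ++ [(speaker, pvLabelAt i)]) (i + 1) rest

def normalize_speakers (turns : List (List (String × String))) : List (List (String × String)) :=
  pvGoA [] 0 turns

-- ===== PORT B =====
-- pass 1b: {name: next(labels) for name in dict.fromkeys(...)}
def pvBuildMap : List String → Nat → List (String × String)
  | [], _ => []
  | n :: rest, i => (n, pvLabelAt i) :: pvBuildMap rest (i + 1)

def normalize_speakers_alt (turns : List (List (String × String))) : List (List (String × String)) :=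
  let names := PySem.List.dedup (turns.map pvStripName)
  let smap := pvBuildMap names 0
  turns.map (fun t =>
    [("speaker", (pvLook smap (pvStripName t)).getD ""), ("text", (pvLook t "text").getD "")])

-- ===== PRECONDITION & SPEC =====
-- Pre_ excludes exactly the inputs where Python A raises: a turn missing the
-- "speaker" or "text" key (KeyError) and more than 26 distinct stripped speakers
-- (StopIteration from next(labels)).
def Pre_normalize_speakers (turns : List (List (String × String))) : Prop :=
  (∀ t ∈ turns, "speaker" ∈ t.map Prod.fst ∧ "text" ∈ t.map Prod.fst) ∧
  (PySem.List.dedup (turns.map (fun t =>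
      PySem.Str.strip (((t.find? (fun p => p.1 == "speaker")).map Prod.snd).getD "")))).length ≤ 26

instance (turns : List (List (String × String))) : Decidable (Pre_normalize_speakers turns) := by
  unfold Pre_normalize_speakers; infer_instance

def pvWitness_normalize_speakers : (List (List (String × String))) :=
  [[("speaker", " John "), ("text", "hi")],
   [("speaker", "Sarah"), ("text", "yo")],
   [("speaker", "John"), ("text", "again")]]

def Spec_normalize_speakers (turns : List (List (String × String))) (out : List (List (String × String))) : Prop := out = normalize_speakers_alt turns
instance (turns : List (List (String × String))) (out : List (List (String × String))) : Decidable (Spec_normalize_speakers turns out) := by unfold Spec_normalize_speakers; infer_instance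

-- ===== CLAIM (what is proved, stated in full; the proofs are below) =====
def Claim_equal_normalize_speakers : Prop := ∀ (turns : List (List (String × String))), Dom_normalize_speakers turns → Pre_normalize_speakers turns → Spec_normalize_speakers turns (normalize_speakers turns)

-- ===== LEMMAS AND PROOFS =====

theorem pvLook_append_of_some {d d' : List (String × String)} {k : String} {v : String}
    (h : pvLook d k = some v) : pvLook (d ++ d') k = some v := by
  induction d with
  | nil => exact absurd h (by simp [pvLook])
  | cons p rest ih =>
    obtain ⟨k', w⟩ := p
    by_cases hk : k' = k <;> simp_all [pvLook]

theorem pvLook_append_of_none {d d' : List (String × String)} {k : String}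
    (h : pvLook d k = none) : pvLook (d ++ d') k = pvLook d' k := by
  induction d with
  | nil => simp
  | cons p rest ih =>
    obtain ⟨k', w⟩ := p
    by_cases hk : k' = k <;> simp_all [pvLook]

theorem pvLook_none_iff {d : List (String × String)} {k : String} :
    pvLook d k = none ↔ k ∉ d.map Prod.fst := by
  induction d with
  | nil => simp [pvLook]
  | cons p rest ih =>
    obtain ⟨k', w⟩ := p
    by_cases hk : k' = k <;> simp_all [pvLook, eq_comm]

-- ordered fresh stripped names of the remaining turns, given the already-seen set
def pvNewOf (seen : List String) : List (List (String × String)) → List String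
  | [] => []
  | t :: rest =>
    let s := pvStripName t
    if s ∈ seen then pvNewOf seen rest else s :: pvNewOf (s :: seen) rest

theorem pvNewOf_congr {seen seen' : List String}
    (h : ∀ x, x ∈ seen ↔ x ∈ seen') (ts : List (List (String × String))) :
    pvNewOf seen ts = pvNewOf seen' ts := by
  induction ts generalizing seen seen' with
  | nil => rfl
  | cons t rest ih =>
    simp only [pvNewOf]
    by_cases hm : pvStripName t ∈ seen
    · rw [if_pos hm, if_pos ((h _).mp hm)]; exact ih h
    · rw [if_neg hm, if_neg (fun hx => hm ((h _).mpr hx))]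
      exact congrArg _ (ih (by intro x; simp [h x]))

-- the key invariant: running A's loop with accumulated map `smap` (i labels used,
-- keys of smap pairwise assigned) emits exactly the B-style mapping through the
-- final map smap ++ pvBuildMap (fresh names) i.
theorem pvGoA_eq (ts : List (List (String × String))) (smap : List (String × String)) (i : Nat) :
    pvGoA smap i ts =
      ts.map (fun t =>
        [("speaker",
          (pvLook (smap ++ pvBuildMap (pvNewOf (smap.map Prod.fst) ts) i) (pvStripName t)).getD ""),
         ("text", (pvLook t "text").getD "")]) := by
  induction ts generalizing smap i with
  | nil => rfl
  | cons t rest ih =>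
    simp only [pvGoA, pvNewOf, List.map]
    cases hl : pvLook smap (pvStripName t) with
    | some lbl =>
      have hmem : pvStripName t ∈ smap.map Prod.fst := by
        by_contra hx
        rw [pvLook_none_iff.mpr hx] at hl
        simp at hl
      rw [if_pos hmem]
      dsimp only
      refine congrArg₂ _ ?_ (ih smap i)
      rw [pvLook_append_of_some hl]
      rfl
    | none =>
      have hmem : pvStripName t ∉ smap.map Prod.fst := pvLook_none_iff.mp hl
      rw [if_neg hmem]
      dsimp only
      have hkeys : ∀ x, x ∈ (smap ++ [(pvStripName t, pvLabelAt i)]).map Prod.fst ↔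
          x ∈ pvStripName t :: smap.map Prod.fst := by
        intro x; simp [or_comm]
      have hrec := ih (smap ++ [(pvStripName t, pvLabelAt i)]) (i + 1)
      rw [pvNewOf_congr hkeys rest] at hrec
      refine congrArg₂ _ ?_ ?_
      · rw [pvLook_append_of_none hl]
        simp [pvBuildMap, pvLook]
      · rw [hrec]
        simp [pvBuildMap, List.append_assoc]

-- B's dedup pass produces exactly the fresh-name list pvNewOf [] computes
theorem pvFoldAdd_eq_newOf (ts : List (List (String × String))) (acc : List String) :
    ts.foldl (fun s t => if pvStripName t ∈ s then s else s ++ [pvStripName t]) acc =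
      acc ++ pvNewOf acc ts := by
  induction ts generalizing acc with
  | nil => simp [pvNewOf]
  | cons t rest ih =>
    simp only [List.foldl, pvNewOf]
    by_cases hm : pvStripName t ∈ acc
    · rw [if_pos hm, if_pos hm, ih]
    · rw [if_neg hm, if_neg hm, ih]
      rw [pvNewOf_congr (seen' := pvStripName t :: acc) (by intro x; simp [or_comm]) rest]
      simp

theorem pvDedup_eq_newOf (ts : List (List (String × String))) :
    PySem.List.dedup (ts.map pvStripName) = pvNewOf [] ts := by
  rw [PySem.List.dedup_eq_ofList, PySem.Set.ofList_eq_foldl, List.foldl_map]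
  simp only [PySem.Set.add_eq_ite]
  simpa using pvFoldAdd_eq_newOf ts []

-- ===== VERDICT (by name: the statement is the Claim_ definition above) =====
theorem normalize_speakers_spec : Claim_equal_normalize_speakers := by
  intro turns _ _
  show normalize_speakers turns = normalize_speakers_alt turns
  unfold normalize_speakers normalize_speakers_alt
  rw [pvGoA_eq turns [] 0, pvDedup_eq_newOf]
  rfl
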